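-- pv_equiv track=rewrite | github.com/COCOBANG/study_market | leetcode_878_magic_number.py | nthMagicalNumber_low_efficient
-- ===== SOURCE A (Python) =====
-- def nthMagicalNumber_low_efficient(N, A, B):
--
--     mod = 10**9 + 7
--     magic_num = []
--     n = 1
--     while len(magic_num) < N:
--         if (n%A == 0) or (n%B == 0):
--             magic_num.append(n)
--         n += 1
--
--     return (n-1) % mod  # 取模
-- ===== SOURCE B (Python) =====
-- def nthMagicalNumber_low_efficient(N, A, B):
--     # binary search on value + inclusion-exclusion count with lcm
--     mod = 10**9 + 7
--     a, b = abs(A), abs(B)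
--     x, y = a, b
--     while y:
--         x, y = y, x % y
--     l = a * b // x  # lcm
--     lo, hi = 0, max(N, 0) * min(a, b)
--     while lo < hi:
--         mid = (lo + hi) // 2
--         if mid // a + mid // b - mid // l < N:
--             lo = mid + 1
--         else:
--             hi = mid
--     return lo % mod
-- ===== Notes on version B (the rewrite author's own statement) =====
-- stated objective: faster
-- what changed: Replaced the linear scan that enumerates every integer up to the answer with a binary search on the value, counting magic numbers below a candidate by inclusion-exclusion with the lcm (gcd by Euclid).
-- outside the precondition, e.g. on nthMagicalNumber_low_efficient(3, 0, 2): A raises ZeroDivisionError, B returns 0; on nthMagicalNumber_low_efficient(3, 1, 0): A returns 3, B returns 0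
import Mathlib
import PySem

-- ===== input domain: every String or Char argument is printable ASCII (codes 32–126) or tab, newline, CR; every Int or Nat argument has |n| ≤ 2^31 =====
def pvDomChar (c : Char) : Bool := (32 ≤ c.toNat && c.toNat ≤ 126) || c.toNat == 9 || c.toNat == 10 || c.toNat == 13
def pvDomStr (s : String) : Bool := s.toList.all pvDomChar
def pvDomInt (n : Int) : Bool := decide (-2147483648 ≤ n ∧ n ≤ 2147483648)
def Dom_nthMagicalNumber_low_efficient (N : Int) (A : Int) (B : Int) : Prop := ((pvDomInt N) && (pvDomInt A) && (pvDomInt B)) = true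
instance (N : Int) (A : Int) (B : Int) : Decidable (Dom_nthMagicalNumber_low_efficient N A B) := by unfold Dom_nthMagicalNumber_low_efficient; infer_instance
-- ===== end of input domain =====

-- B replaces A's linear scan by binary search on the value with an inclusion-exclusion
-- count via the lcm (objective: faster, asymptotically).


-- ===== PORT A =====
-- while len(magic_num) < N: if n%A==0 or n%B==0: magic_num.append(n); n += 1
-- (the fuel argument only makes the loop total; under Pre_ it is large enough, see lemmas below;
--  magic_num is kept in reverse, cons being Python's O(1) append, and its length is carried
--  alongside in `len` — Python's len() is O(1) — with the invariant len = acc.length)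
def pvLoopA (N A B : Int) (acc : List Int) (len : Nat) (n : Int) : Nat → Int
  | 0 => n
  | f + 1 =>
    if (len : Int) < N then
      (if PySem.Int.mod n A = 0 ∨ PySem.Int.mod n B = 0 then
        pvLoopA N A B (n :: acc) (len + 1) (n + 1) f
      else
        pvLoopA N A B acc len (n + 1) f)
    else n

def nthMagicalNumber_low_efficient (N : Int) (A : Int) (B : Int) : Int :=
  PySem.Int.mod (pvLoopA N A B [] 0 1 ((N * min |A| |B|).toNat + 1) - 1) (10 ^ 9 + 7)

-- ===== PORT B =====
-- Euclid's gcd loop: while y: x, y = y, x % y  (fuel only makes it total)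
def pvGcdLoop (x y : Int) : Nat → Int
  | 0 => x
  | f + 1 => if y ≠ 0 then pvGcdLoop y (PySem.Int.mod x y) f else x

-- while lo < hi: mid = (lo+hi)//2; if mid//a + mid//b - mid//l < N: lo = mid+1 else hi = mid
def pvBsLoop (N a b l : Int) (lo hi : Int) : Nat → Int
  | 0 => lo
  | f + 1 =>
    if lo < hi then
      let mid := PySem.Int.floordiv (lo + hi) 2
      if PySem.Int.floordiv mid a + PySem.Int.floordiv mid b - PySem.Int.floordiv mid l < N
      then pvBsLoop N a b l (mid + 1) hi f
      else pvBsLoop N a b l lo mid f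
    else lo

def nthMagicalNumber_low_efficient_alt (N : Int) (A : Int) (B : Int) : Int :=
  let a := |A|
  let b := |B|
  let g := pvGcdLoop a b (b.toNat + 1)
  let l := PySem.Int.floordiv (a * b) g
  let hi := max N 0 * min a b
  PySem.Int.mod (pvBsLoop N a b l 0 hi hi.toNat) (10 ^ 9 + 7)

-- ===== PRECONDITION & SPEC =====
-- Pre_ excludes A = 0 or B = 0: counting multiples of 0 is undefined and Python A raises
-- ZeroDivisionError there, except in the accidental corner |A| = 1 where the short-circuit
-- 'or' never evaluates n % B and A still returns a value.
def Pre_nthMagicalNumber_low_efficient (N : Int) (A : Int) (B : Int) : Prop := A ≠ 0 ∧ B ≠ 0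
instance (N : Int) (A : Int) (B : Int) : Decidable (Pre_nthMagicalNumber_low_efficient N A B) := by unfold Pre_nthMagicalNumber_low_efficient; infer_instance
def pvWitness_nthMagicalNumber_low_efficient : Int × Int × Int := (5, 2, 3)

def Spec_nthMagicalNumber_low_efficient (N : Int) (A : Int) (B : Int) (out : Int) : Prop := out = nthMagicalNumber_low_efficient_alt N A B
instance (N : Int) (A : Int) (B : Int) (out : Int) : Decidable (Spec_nthMagicalNumber_low_efficient N A B out) := by unfold Spec_nthMagicalNumber_low_efficient; infer_instance

-- ===== CLAIM (what is proved, stated in full; the proofs are below) =====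
def Claim_equal_nthMagicalNumber_low_efficient : Prop := ∀ (N : Int) (A : Int) (B : Int), Dom_nthMagicalNumber_low_efficient N A B → Pre_nthMagicalNumber_low_efficient N A B → Spec_nthMagicalNumber_low_efficient N A B (nthMagicalNumber_low_efficient N A B)

-- ===== LEMMAS AND PROOFS =====

-- the count of magic numbers in [1, x], by inclusion-exclusion (Nat version)
def pvCnt (na nb : Nat) (x : Nat) : Nat := x / na + x / nb - x / Nat.lcm na nb

theorem pvCnt_sub_le (na nb : Nat) (ha : 0 < na) (hb : 0 < nb) (x : Nat) :
    x / Nat.lcm na nb ≤ x / na ∧ x / Nat.lcm na nb ≤ x / nb := by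
  have hL : 0 < Nat.lcm na nb := Nat.lcm_pos ha hb
  exact ⟨Nat.div_le_div_left (Nat.le_of_dvd hL (Nat.dvd_lcm_left na nb)) ha,
         Nat.div_le_div_left (Nat.le_of_dvd hL (Nat.dvd_lcm_right na nb)) hb⟩

theorem pvCnt_succ (na nb : Nat) (ha : 0 < na) (hb : 0 < nb) (x : Nat) :
    pvCnt na nb (x + 1) =
      pvCnt na nb x + (if na ∣ (x + 1) ∨ nb ∣ (x + 1) then 1 else 0) := by
  have hs1 := (pvCnt_sub_le na nb ha hb x).1
  have hs2 := (pvCnt_sub_le na nb ha hb x).2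
  have hiff : Nat.lcm na nb ∣ (x + 1) ↔ na ∣ (x + 1) ∧ nb ∣ (x + 1) :=
    ⟨fun h => ⟨(Nat.dvd_lcm_left na nb).trans h, (Nat.dvd_lcm_right na nb).trans h⟩,
     fun h => Nat.lcm_dvd h.1 h.2⟩
  unfold pvCnt
  rw [Nat.succ_div, Nat.succ_div, Nat.succ_div]
  by_cases hA : na ∣ (x + 1) <;> by_cases hB : nb ∣ (x + 1)
  all_goals simp only [hiff, hA, hB, and_self, and_true, and_false, or_self, or_false,
    false_or, or_true, true_or, if_true, if_false]
  all_goals generalize hu : x / na = u at hs1 ⊢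
  all_goals generalize hv : x / nb = v at hs2 ⊢
  all_goals generalize hw : x / Nat.lcm na nb = w at hs1 hs2 ⊢
  all_goals omega

theorem pvCnt_mono (na nb : Nat) (ha : 0 < na) (hb : 0 < nb) :
    Monotone (pvCnt na nb) := by
  apply monotone_nat_of_le_succ
  intro x
  rw [pvCnt_succ na nb ha hb x]
  split <;> omega

theorem pvCnt_reach (na nb : Nat) (ha : 0 < na) (hb : 0 < nb) (k : Nat) :
    k ≤ pvCnt na nb (k * min na nb) := by
  rcases le_total na nb with h | h
  · rw [min_eq_left h]
    have hs2 := (pvCnt_sub_le na nb ha hb (k * na)).2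
    have h1 : k * na / na = k := Nat.mul_div_cancel k ha
    unfold pvCnt
    rw [h1]
    generalize hv : k * na / nb = v at hs2 ⊢
    generalize hw : k * na / Nat.lcm na nb = w at hs2 ⊢
    omega
  · rw [min_eq_right h]
    have hs1 := (pvCnt_sub_le na nb ha hb (k * nb)).1
    have h1 : k * nb / nb = k := Nat.mul_div_cancel k hb
    unfold pvCnt
    rw [h1]
    generalize hu : k * nb / na = u at hs1 ⊢
    generalize hw : k * nb / Nat.lcm na nb = w at hs1 ⊢
    omega

theorem pvGcdLoop_eq (f : Nat) (x y : Nat) (hf : y < f) :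
    pvGcdLoop (x : Int) (y : Int) f = (Nat.gcd x y : Int) := by
  induction f generalizing x y with
  | zero => omega
  | succ f ih =>
    simp only [pvGcdLoop]
    by_cases hy : y = 0
    · subst hy; simp
    · have hy' : ((y : Int) ≠ 0) := by exact_mod_cast hy
      rw [if_pos hy']
      have hmod : PySem.Int.mod (x : Int) (y : Int) = ((x % y : Nat) : Int) :=
        PySem.Int.mod_natCast x y
      rw [hmod, ih y (x % y) (by have := Nat.mod_lt x (Nat.pos_of_ne_zero hy); omega)]
      congr 1
      rw [Nat.gcd_comm y (x % y), ← Nat.gcd_rec y x, Nat.gcd_comm y x]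

theorem pvLoopA_eq (A B : Int) (na nb N' : Nat) (ha : 0 < na) (hb : 0 < nb)
    (hA : (na : Int) = |A|) (hB : (nb : Int) = |B|)
    (ans : Nat) (hans : N' ≤ pvCnt na nb ans)
    (hmin : ∀ x, x < ans → pvCnt na nb x < N') :
    ∀ (f m : Nat) (acc : List Int), m ≤ ans → ans + 1 ≤ m + f →
      pvLoopA (N' : Int) A B acc (pvCnt na nb m) ((m : Int) + 1) f = (ans : Int) + 1 := by
  intro f
  induction f with
  | zero => intro m acc h1 h2; omega
  | succ f ih =>
    intro m acc h1 h2
    simp only [pvLoopA]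
    by_cases hm : m = ans
    · have hstop : ¬ (((pvCnt na nb m : Nat) : Int) < (N' : Int)) := by
        rw [hm]; exact_mod_cast not_lt.mpr hans
      rw [if_neg hstop, hm]
    · have hlt : m < ans := lt_of_le_of_ne h1 hm
      have hcnt : pvCnt na nb m < N' := hmin m hlt
      have hcond : ((pvCnt na nb m : Nat) : Int) < (N' : Int) := by
        exact_mod_cast hcnt
      rw [if_pos hcond]
      have hdiv : (PySem.Int.mod ((m : Int) + 1) A = 0 ∨ PySem.Int.mod ((m : Int) + 1) B = 0)
          ↔ (na ∣ (m + 1) ∨ nb ∣ (m + 1)) := by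
        rw [PySem.Int.mod_eq_zero_iff_dvd, PySem.Int.mod_eq_zero_iff_dvd,
            ← abs_dvd A, ← abs_dvd B, ← hA, ← hB]
        have hc : ((m : Int) + 1) = ((m + 1 : Nat) : Int) := by push_cast; ring
        rw [hc, Int.natCast_dvd_natCast, Int.natCast_dvd_natCast]
      have hcast : ((m : Int) + 1) + 1 = ((m + 1 : Nat) : Int) + 1 := by push_cast; ring
      by_cases hd : na ∣ (m + 1) ∨ nb ∣ (m + 1)
      · rw [if_pos (hdiv.mpr hd), hcast]
        have hc1 : pvCnt na nb m + 1 = pvCnt na nb (m + 1) := by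
          rw [pvCnt_succ na nb ha hb m, if_pos hd]
        rw [hc1]
        exact ih (m + 1) _ (by omega) (by omega)
      · rw [if_neg (fun h => hd (hdiv.mp h)), hcast]
        have hc1 : pvCnt na nb m = pvCnt na nb (m + 1) := by
          rw [pvCnt_succ na nb ha hb m, if_neg hd]
          omega
        rw [hc1]
        exact ih (m + 1) _ (by omega) (by omega)

theorem pvBsLoop_eq (na nb N' : Nat) (ha : 0 < na) (hb : 0 < nb)
    (ans : Nat) (hans : N' ≤ pvCnt na nb ans)
    (hmin : ∀ x, x < ans → pvCnt na nb x < N') :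
    ∀ (f lo hi : Nat), lo ≤ ans → ans ≤ hi → hi ≤ lo + f →
      pvBsLoop (N' : Int) (na : Int) (nb : Int) ((Nat.lcm na nb : Nat) : Int)
        (lo : Int) (hi : Int) f = (ans : Int) := by
  intro f
  induction f with
  | zero =>
    intro lo hi h1 h2 h3
    have : lo = ans := by omega
    simp [pvBsLoop, this]
  | succ f ih =>
    intro lo hi h1 h2 h3
    simp only [pvBsLoop]
    by_cases hlh : lo < hi
    · have hlh' : (lo : Int) < (hi : Int) := by exact_mod_cast hlh
      rw [if_pos hlh']
      have hmid : PySem.Int.floordiv ((lo : Int) + (hi : Int)) 2 = (((lo + hi) / 2 : Nat) : Int) := by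
        have : ((lo : Int) + (hi : Int)) = ((lo + hi : Nat) : Int) := by push_cast; ring
        rw [this]
        exact_mod_cast PySem.Int.floordiv_natCast (lo + hi) 2
      set midn := (lo + hi) / 2 with hmidn
      have hlo : lo ≤ midn := by omega
      have hhi : midn < hi := by omega
      have hs := pvCnt_sub_le na nb ha hb midn
      have hcnt : PySem.Int.floordiv ((midn : Nat) : Int) (na : Int)
          + PySem.Int.floordiv ((midn : Nat) : Int) (nb : Int)
          - PySem.Int.floordiv ((midn : Nat) : Int) ((Nat.lcm na nb : Nat) : Int)
          = (pvCnt na nb midn : Int) := by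
        rw [PySem.Int.floordiv_natCast, PySem.Int.floordiv_natCast, PySem.Int.floordiv_natCast]
        unfold pvCnt
        push_cast [Nat.cast_sub (le_trans hs.1 (Nat.le_add_right _ _))]
        omega
      rw [hmid]
      by_cases hc : pvCnt na nb midn < N'
      · have hc' : PySem.Int.floordiv ((midn : Nat) : Int) (na : Int)
            + PySem.Int.floordiv ((midn : Nat) : Int) (nb : Int)
            - PySem.Int.floordiv ((midn : Nat) : Int) ((Nat.lcm na nb : Nat) : Int) < (N' : Int) := by
          rw [hcnt]; exact_mod_cast hc
        rw [if_pos hc']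
        have hansgt : midn < ans := by
          by_contra h
          push_neg at h
          exact absurd (le_trans hans (pvCnt_mono na nb ha hb h)) (not_le.mpr hc)
        have : ((midn : Nat) : Int) + 1 = ((midn + 1 : Nat) : Int) := by push_cast; ring
        rw [this]
        exact ih (midn + 1) hi (by omega) h2 (by omega)
      · have hc' : ¬ (PySem.Int.floordiv ((midn : Nat) : Int) (na : Int)
            + PySem.Int.floordiv ((midn : Nat) : Int) (nb : Int)
            - PySem.Int.floordiv ((midn : Nat) : Int) ((Nat.lcm na nb : Nat) : Int) < (N' : Int)) := by
          rw [hcnt]; exact_mod_cast hc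
        rw [if_neg hc']
        have hansle : ans ≤ midn := by
          by_contra h
          push_neg at h
          exact hc (hmin midn h)
        exact ih lo midn h1 hansle (by omega)
    · have hlh' : ¬ ((lo : Int) < (hi : Int)) := by exact_mod_cast hlh
      rw [if_neg hlh']
      have : lo = ans := by omega
      exact_mod_cast congrArg (Nat.cast : Nat → Int) this

-- ===== VERDICT (by name: the statement is the Claim_ definition above) =====
theorem nthMagicalNumber_low_efficient_spec : Claim_equal_nthMagicalNumber_low_efficient := by
  intro N A B _ hPre
  obtain ⟨hA0, hB0⟩ := hPre
  unfold Spec_nthMagicalNumber_low_efficient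
  unfold nthMagicalNumber_low_efficient nthMagicalNumber_low_efficient_alt
  set na := |A|.toNat with hna
  set nb := |B|.toNat with hnb
  have hA : (na : Int) = |A| := Int.toNat_of_nonneg (abs_nonneg A)
  have hB : (nb : Int) = |B| := Int.toNat_of_nonneg (abs_nonneg B)
  have ha : 0 < na := by
    have : (0 : Int) < |A| := abs_pos.mpr hA0
    omega
  have hb : 0 < nb := by
    have : (0 : Int) < |B| := abs_pos.mpr hB0
    omega
  -- gcd and lcm on the B side
  have hg : pvGcdLoop |A| |B| (|B|.toNat + 1) = (Nat.gcd na nb : Int) := by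
    rw [← hA, ← hB]
    exact pvGcdLoop_eq (nb + 1) na nb (by omega)
  have hl : PySem.Int.floordiv (|A| * |B|) (pvGcdLoop |A| |B| (|B|.toNat + 1))
      = ((Nat.lcm na nb : Nat) : Int) := by
    rw [hg, ← hA, ← hB]
    have : ((na : Int) * (nb : Int)) = ((na * nb : Nat) : Int) := by push_cast; ring
    rw [this, PySem.Int.floordiv_natCast (na * nb) (Nat.gcd na nb)]
    rfl
  by_cases hN : N ≤ 0
  · -- trivial case: both return 0 immediately
    have hloopA : pvLoopA N A B [] 0 1 ((N * min |A| |B|).toNat + 1) = 1 := by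
      simp only [pvLoopA, Int.natCast_zero]
      rw [if_neg (by omega)]
    have hhi : max N 0 * min |A| |B| = 0 := by
      rw [max_eq_right hN]; ring
    simp only [hhi, hloopA]
    norm_num [pvBsLoop]
  · push_neg at hN
    set N' := N.toNat with hN'
    have hNc : (N' : Int) = N := Int.toNat_of_nonneg (by omega)
    have hEx : ∃ x, N' ≤ pvCnt na nb x := ⟨N' * min na nb, pvCnt_reach na nb ha hb N'⟩
    set ans := Nat.find hEx with hansdef
    have hans : N' ≤ pvCnt na nb ans := Nat.find_spec hEx
    have hmin : ∀ x, x < ans → pvCnt na nb x < N' := by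
      intro x hx
      have := Nat.find_min hEx hx
      omega
    have hansle : ans ≤ N' * min na nb := Nat.find_le (pvCnt_reach na nb ha hb N')
    -- A side
    have hfuel : (N * min |A| |B|).toNat + 1 = N' * min na nb + 1 := by
      rw [← hNc, ← hA, ← hB]
      have : (N' : Int) * min (na : Int) (nb : Int) = ((N' * min na nb : Nat) : Int) := by
        rw [Nat.cast_mul, Nat.cast_min]
      rw [this, Int.toNat_natCast]
    have hAside : pvLoopA N A B [] 0 1 ((N * min |A| |B|).toNat + 1) = (ans : Int) + 1 := by
      rw [hfuel, ← hNc]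
      have := pvLoopA_eq A B na nb N' ha hb hA hB ans hans hmin
        (N' * min na nb + 1) 0 [] (by omega) (by omega)
      simpa [pvCnt] using this
    -- B side
    have hhi : max N 0 * min |A| |B| = ((N' * min na nb : Nat) : Int) := by
      rw [max_eq_left (by omega), ← hNc, ← hA, ← hB, Nat.cast_mul, Nat.cast_min]
    have hBside : pvBsLoop N |A| |B|
        (PySem.Int.floordiv (|A| * |B|) (pvGcdLoop |A| |B| (|B|.toNat + 1)))
        0 (max N 0 * min |A| |B|) (max N 0 * min |A| |B|).toNat = (ans : Int) := by
      rw [hl, hhi, ← hNc, ← hA, ← hB, Int.toNat_natCast]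
      have h0 : ((0 : Nat) : Int) = (0 : Int) := rfl
      rw [← h0]
      exact pvBsLoop_eq na nb N' ha hb ans hans hmin (N' * min na nb) 0 (N' * min na nb)
        (by omega) hansle (by omega)
    simp only [hAside, hBside]
    norm_num
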